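-- pv_equiv track=rewrite | github.com/durkode/aoc2023 | day12p1/main.py | is_valid_arrangement
-- ===== SOURCE A (Python) =====
-- def is_valid_arrangement(record, damage_counts):
--     groupings = [x for x in record.split(".") if x]
--     if len(groupings) != len(damage_counts):
--         return False
--     for group, length in zip(groupings, damage_counts):
--         if len(group) != length:
--             return False
--     return True
-- ===== SOURCE B (Python) =====
-- def is_valid_arrangement(record, damage_counts):
--     # One-pass run-length scan; a sentinel '.' flushes the final run.
--     idx = 0
--     run = 0
--     for ch in record + ".":
--         if ch == '.':
--             if run:
--                 if idx >= len(damage_counts) or damage_counts[idx] != run: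
--                     return False
--                 idx += 1
--                 run = 0
--         else:
--             run += 1
--     return idx == len(damage_counts)
-- ===== Notes on version B (the rewrite author's own statement) =====
-- stated objective: alternative
-- what changed: Replaced split('.')-into-substrings plus a zip comparison loop by a single character scan keeping a run-length counter and an index into damage_counts, allocating no substring list; it trades C-level split speed for a one-pass early-exit scan.
import Mathlib
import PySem

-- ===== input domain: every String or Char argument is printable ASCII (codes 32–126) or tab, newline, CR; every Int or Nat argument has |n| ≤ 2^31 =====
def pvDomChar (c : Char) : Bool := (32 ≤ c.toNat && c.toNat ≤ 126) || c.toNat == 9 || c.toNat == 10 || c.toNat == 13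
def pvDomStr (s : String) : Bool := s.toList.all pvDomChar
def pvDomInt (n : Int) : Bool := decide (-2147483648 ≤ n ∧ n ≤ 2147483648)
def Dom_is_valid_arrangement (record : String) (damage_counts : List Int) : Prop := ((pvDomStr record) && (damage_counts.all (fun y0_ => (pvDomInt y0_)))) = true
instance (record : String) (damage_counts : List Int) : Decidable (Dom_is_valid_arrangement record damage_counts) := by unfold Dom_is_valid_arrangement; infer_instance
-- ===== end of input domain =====

-- B replaces A's split('.')-into-substrings plus zip comparison by a single run-length
-- scan over the characters with an index into damage_counts (objective: alternative decomposition).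


-- ===== PORT A =====
-- the 'for group, length in zip(...)' loop with its early return False
def aLoop : List (List Char × Int) → Bool
  | [] => true
  | (g, len) :: rest => if (g.length : Int) ≠ len then false else aLoop rest

def is_valid_arrangement (record : String) (damage_counts : List Int) : Bool :=
  -- groupings = [x for x in record.split(".") if x]  (strings handled on the List Char side)
  let groupings := (PySem.Chars.splitOn record.toList ['.']).filter (fun x => x ≠ [])
  if groupings.length ≠ damage_counts.length then false
  else aLoop (groupings.zip damage_counts)

-- ===== PORT B =====
-- the 'for ch in record + "."' loop of Source B, carrying idx and run
def bGo (counts : List Int) : List Char → Nat → Nat → Bool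
  | [], idx, _ => idx == counts.length
  | c :: cs, idx, run =>
    if c = '.' then
      if run ≠ 0 then
        if h : idx < counts.length then
          if counts[idx] ≠ (run : Int) then false else bGo counts cs (idx + 1) 0
        else false
      else bGo counts cs idx run
    else bGo counts cs idx (run + 1)

def is_valid_arrangement_alt (record : String) (damage_counts : List Int) : Bool :=
  bGo damage_counts (record.toList ++ ['.']) 0 0

-- ===== PRECONDITION & SPEC =====
def Spec_is_valid_arrangement (record : String) (damage_counts : List Int) (out : Bool) : Prop := out = is_valid_arrangement_alt record damage_counts
instance (record : String) (damage_counts : List Int) (out : Bool) : Decidable (Spec_is_valid_arrangement record damage_counts out) := by unfold Spec_is_valid_arrangement; infer_instance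

-- ===== CLAIM (what is proved, stated in full; the proofs are below) =====
def Claim_equal_is_valid_arrangement : Prop := ∀ (record : String) (damage_counts : List Int), Dom_is_valid_arrangement record damage_counts → Spec_is_valid_arrangement record damage_counts (is_valid_arrangement record damage_counts)

-- ===== LEMMAS AND PROOFS =====

-- lengths (as Ints) of the maximal runs of non-'.' characters, with a pending run of length `run`
def groups : List Char → Nat → List Int
  | [], run => if run = 0 then [] else [(run : Int)]
  | c :: cs, run =>
    if c = '.' then (if run = 0 then groups cs 0 else (run : Int) :: groups cs 0)
    else groups cs (run + 1)

-- like `groups` but the trailing run is discarded (what bGo sees before the sentinel)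
def groupsS : List Char → Nat → List Int
  | [], _ => []
  | c :: cs, run =>
    if c = '.' then (if run = 0 then groupsS cs 0 else (run : Int) :: groupsS cs 0)
    else groupsS cs (run + 1)

def lenGroups (xs : List (List Char)) : List Int :=
  (xs.filter (fun x => x ≠ [])).map (fun g => (g.length : Int))

theorem groupsS_append_dot (l : List Char) (run : Nat) :
    groupsS (l ++ ['.']) run = groups l run := by
  induction l generalizing run with
  | nil => simp [groupsS, groups]
  | cons c cs ih => simp only [List.cons_append, groupsS, groups]; split_ifs <;> simp [ih]

theorem bGo_eq (counts : List Int) (l : List Char) (idx run : Nat) (h : idx ≤ counts.length) :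
    bGo counts l idx run = decide (counts.drop idx = groupsS l run) := by
  induction l generalizing idx run with
  | nil =>
    simp only [bGo, groupsS, List.drop_eq_nil_iff, beq_eq_decide, decide_eq_decide]
    omega
  | cons c cs ih =>
    by_cases hc : c = '.'
    · subst hc
      by_cases hr : run = 0
      · rw [show bGo counts ('.' :: cs) idx run = bGo counts cs idx run by
              simp only [bGo]; rw [if_pos trivial, if_neg (by simpa using hr)]]
        rw [show groupsS ('.' :: cs) run = groupsS cs 0 by
              simp only [groupsS]; rw [if_pos trivial, if_pos hr]]
        rw [ih _ _ h, hr]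
      · rw [show bGo counts ('.' :: cs) idx run
              = if h : idx < counts.length then
                  (if counts[idx] ≠ (run : Int) then false else bGo counts cs (idx + 1) 0)
                else false by
              simp only [bGo]; rw [if_pos trivial, if_pos hr]]
        rw [show groupsS ('.' :: cs) run = (run : Int) :: groupsS cs 0 by
              simp only [groupsS]; rw [if_pos trivial, if_neg hr]]
        by_cases hlt : idx < counts.length
        · rw [dif_pos hlt, List.drop_eq_getElem_cons hlt]
          by_cases hv : counts[idx] = (run : Int)
          · rw [if_neg (by simp [hv]), ih _ _ (by omega), hv]
            simp
          · rw [if_pos (by simpa using hv)]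
            have hne : counts.drop idx ≠ (run : Int) :: groupsS cs 0 := by
              rw [List.drop_eq_getElem_cons hlt]
              intro h2
              exact hv (List.cons_eq_cons.mp h2).1
            simp [hne]
        · rw [dif_neg hlt]
          rw [show counts.drop idx = [] by simp [List.drop_eq_nil_iff]; omega]
          simp
    · rw [show bGo counts (c :: cs) idx run = bGo counts cs idx (run + 1) by
            simp only [bGo]; rw [if_neg hc]]
      rw [show groupsS (c :: cs) run = groupsS cs (run + 1) by
            simp only [groupsS]; rw [if_neg hc]]
      exact ih _ _ h

theorem splitOn_go_lenGroups (l : List Char) (fuel : Nat) (cur : List Char)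
    (acc : List (List Char)) (hf : l.length < fuel) :
    lenGroups (PySem.Chars.splitOn.go ['.'] fuel l cur acc)
      = lenGroups acc.reverse ++ groups l cur.length := by
  induction l generalizing fuel cur acc with
  | nil =>
    obtain ⟨f, rfl⟩ : ∃ f, fuel = f + 1 := ⟨fuel - 1, by omega⟩
    rw [show PySem.Chars.splitOn.go ['.'] (f + 1) [] cur acc = (cur.reverse :: acc).reverse from rfl]
    simp only [List.reverse_cons, groups, lenGroups, List.filter_append, List.map_append]
    by_cases hcur : cur = []
    · simp [hcur]
    · have h1 : cur.reverse ≠ [] := by simpa using hcur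
      have h2 : ¬ cur.length = 0 := by simpa [List.length_eq_zero_iff] using hcur
      simp [h1, h2]
  | cons c cs ih =>
    obtain ⟨f, rfl⟩ : ∃ f, fuel = f + 1 := ⟨fuel - 1, by omega⟩
    have hlen : cs.length < f := by simp at hf; omega
    by_cases hc : c = '.'
    · subst hc
      have hpre : List.isPrefixOf ['.'] ('.' :: cs) = true := by
        simp [List.isPrefixOf]
      rw [show PySem.Chars.splitOn.go ['.'] (f + 1) ('.' :: cs) cur acc
            = PySem.Chars.splitOn.go ['.'] f (List.drop (List.length ['.']) ('.' :: cs)) [] (cur.reverse :: acc) by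
          simp only [PySem.Chars.splitOn.go, hpre]; rw [if_pos trivial]]
      rw [show List.drop (List.length ['.']) ('.' :: cs) = cs by simp]
      rw [ih f [] (cur.reverse :: acc) hlen]
      rw [show groups ('.' :: cs) cur.length
            = (if cur.length = 0 then groups cs 0 else (cur.length : Int) :: groups cs 0) by
          simp only [groups]; rw [if_pos trivial]]
      simp only [List.reverse_cons, lenGroups, List.filter_append, List.map_append, List.length_nil]
      by_cases hcur : cur = []
      · simp [hcur]
      · have h1 : cur.reverse ≠ [] := by simpa using hcur
        have h2 : ¬ cur.length = 0 := by simpa [List.length_eq_zero_iff] using hcur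
        simp [h1, h2]
    · have hpre : List.isPrefixOf ['.'] (c :: cs) = false := by
        simp [List.isPrefixOf]
        exact fun h => hc h.symm
      rw [show PySem.Chars.splitOn.go ['.'] (f + 1) (c :: cs) cur acc
            = PySem.Chars.splitOn.go ['.'] f cs (c :: cur) acc by
          simp only [PySem.Chars.splitOn.go, hpre]; rw [if_neg (by simp)]]
      rw [ih f (c :: cur) acc hlen]
      rw [show groups (c :: cs) cur.length = groups cs (cur.length + 1) by
          simp only [groups]; rw [if_neg hc]]
      simp
theorem splitOn_lenGroups (l : List Char) :
    lenGroups (PySem.Chars.splitOn l ['.']) = groups l 0 := by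
  rw [PySem.Chars.splitOn, splitOn_go_lenGroups l (l.length + 1) [] [] (by omega)]
  simp [lenGroups]

theorem aLoop_eq (gs : List (List Char)) (counts : List Int)
    (h : gs.length = counts.length) :
    aLoop (gs.zip counts) = decide (gs.map (fun g => (g.length : Int)) = counts) := by
  induction gs generalizing counts with
  | nil =>
    cases counts with
    | nil => simp [aLoop]
    | cons c cs => simp at h
  | cons g gs ih =>
    cases counts with
    | nil => simp at h
    | cons c cs =>
      simp only [List.zip_cons_cons, aLoop, List.map_cons]
      by_cases hv : (g.length : Int) = c
      · rw [if_neg (by simp [hv]), ih cs (by simpa using h)]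
        simp [hv]
      · rw [if_pos (by simpa using hv)]
        simp [hv]

theorem a_eq_decide (record : String) (counts : List Int) :
    is_valid_arrangement record counts = decide (groups record.toList 0 = counts) := by
  unfold is_valid_arrangement
  rw [← splitOn_lenGroups record.toList]
  set gs := (PySem.Chars.splitOn record.toList ['.']).filter (fun x => x ≠ []) with hgs
  have hfix : lenGroups (PySem.Chars.splitOn record.toList ['.'])
      = gs.map (fun g => (g.length : Int)) := by
    simp [lenGroups, hgs]
  by_cases hlen : gs.length = counts.length
  · rw [if_neg (by simp [hlen]), aLoop_eq gs counts hlen, hfix]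
  · rw [if_pos (by simpa using hlen)]
    have : gs.map (fun g => (g.length : Int)) ≠ counts := by
      intro hEq
      exact hlen (by simpa using congrArg List.length hEq)
    rw [hfix]
    simp [this]

-- ===== VERDICT (by name: the statement is the Claim_ definition above) =====
theorem is_valid_arrangement_spec : Claim_equal_is_valid_arrangement := by
  intro record counts _
  unfold Spec_is_valid_arrangement is_valid_arrangement_alt
  rw [a_eq_decide, bGo_eq counts _ 0 0 (by omega)]
  simp [groupsS_append_dot, eq_comm]
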